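-- pv_equiv track=rewrite | github.com/YaniWessi/CodingProblems | bestSeat.py | bestSeat
-- ===== SOURCE A (Python) =====
-- def bestSeat(seats):
--   bestSeat = -1
--   maxSpace = 0
--
--   left = 0
--   while left < len(seats):
--     right = left + 1
--     while right < len(seats) and seats[right] == 0:
--       right += 1
--     availableSpace = right - left - 1
--     if availableSpace > maxSpace:
--       bestSeat = (left + right) // 2
--       maxSpace = availableSpace
--     left = right
--   return bestSeat
--
-- seats = [1, 0, 1, 0, 0, 0, 1]
-- ===== SOURCE B (Python) =====
-- def bestSeat(seats):
--     n = len(seats)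
--     bounds = [0] + [i for i in range(1, n) if seats[i] != 0] + [n]
--     best = -1
--     maxSpace = 0
--     for l, r in zip(bounds, bounds[1:]):
--         gap = r - l - 1
--         if gap > maxSpace:
--             maxSpace = gap
--             best = (l + r) // 2
--     return best
-- ===== Notes on version B (the rewrite author's own statement) =====
-- stated objective: simpler
-- what changed: Replaces A's nested pointer-jumping while-loops with a precomputed boundary-index list (0, every nonzero index >= 1, len) and a single pass over consecutive boundary pairs; the list comprehension and zip pass avoid A's per-step interpreted while-loop overhead.
import Mathlib
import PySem

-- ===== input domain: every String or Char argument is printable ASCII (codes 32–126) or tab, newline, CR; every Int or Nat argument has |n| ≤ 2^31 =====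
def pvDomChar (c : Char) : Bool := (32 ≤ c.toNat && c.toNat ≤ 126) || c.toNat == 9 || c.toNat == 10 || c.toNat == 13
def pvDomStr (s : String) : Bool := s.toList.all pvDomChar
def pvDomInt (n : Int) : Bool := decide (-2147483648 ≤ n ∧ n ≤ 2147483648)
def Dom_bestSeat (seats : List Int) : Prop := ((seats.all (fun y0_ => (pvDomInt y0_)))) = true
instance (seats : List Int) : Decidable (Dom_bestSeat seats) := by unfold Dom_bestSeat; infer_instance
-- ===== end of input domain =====

-- B replaces A's nested pointer-jumping while-loops by a boundary-index table and a single pass over consecutive pairs (objective: simpler).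

-- ===== PORT A =====
-- inner while: advance right while right < len(seats) and seats[right] == 0
def bestSeatRight (seats : List Int) (right : Nat) : Nat :=
  if h : right < seats.length ∧ PySem.List.pyGet? seats (right : Int) = some 0 then
    bestSeatRight seats (right + 1)
  else right
termination_by seats.length - right
decreasing_by omega

-- outer while over left, carrying bestSeat and maxSpace
lemma le_bestSeatRight (seats : List Int) (r : Nat) : r ≤ bestSeatRight seats r := by
  fun_induction bestSeatRight with
  | case1 r _ ih => omega
  | case2 => omega

def bestSeatLoop (seats : List Int) (left : Nat) (best maxSpace : Int) : Int :=
  if _h : left < seats.length then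
    let right := bestSeatRight seats (left + 1)
    let availableSpace : Int := (right : Int) - (left : Int) - 1
    if availableSpace > maxSpace then
      bestSeatLoop seats right (PySem.Int.floordiv ((left : Int) + (right : Int)) 2) availableSpace
    else
      bestSeatLoop seats right best maxSpace
  else best
termination_by seats.length - left
decreasing_by
  · have := le_bestSeatRight seats (left + 1); omega
  · have := le_bestSeatRight seats (left + 1); omega

def bestSeat (seats : List Int) : Int := bestSeatLoop seats 0 (-1) 0

-- ===== PORT B =====
def bestSeat_alt (seats : List Int) : Int :=
  let n : Int := (seats.length : Int)
  let bounds : List Int :=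
    0 :: ((PySem.List.pyRange 1 n 1).filter
            (fun i => PySem.List.pyGet? seats i ≠ some 0) ++ [n])
  let res := (List.zip bounds bounds.tail).foldl
    (fun (st : Int × Int) (p : Int × Int) =>
      let gap := p.2 - p.1 - 1
      if gap > st.2 then (PySem.Int.floordiv (p.1 + p.2) 2, gap) else st)
    (-1, 0)
  res.1

-- ===== PRECONDITION & SPEC =====
def Spec_bestSeat (seats : List Int) (out : Int) : Prop := out = bestSeat_alt seats
instance (seats : List Int) (out : Int) : Decidable (Spec_bestSeat seats out) := by unfold Spec_bestSeat; infer_instance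

-- ===== CLAIM (what is proved, stated in full; the proofs are below) =====
def Claim_equal_bestSeat : Prop := ∀ (seats : List Int), Dom_bestSeat seats → Spec_bestSeat seats (bestSeat seats)

-- ===== LEMMAS AND PROOFS =====

-- the common fold step
def pvStep (st p : Int × Int) : Int × Int :=
  if p.2 - p.1 - 1 > st.2 then (PySem.Int.floordiv (p.1 + p.2) 2, p.2 - p.1 - 1) else st

-- the boundary list A's outer loop visits, strictly after position l (ends with seats.length)
def pvBounds (seats : List Int) (l : Nat) : List Nat :=
  if h : l < seats.length then
    bestSeatRight seats (l + 1) :: pvBounds seats (bestSeatRight seats (l + 1))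
  else []
termination_by seats.length - l
decreasing_by have := le_bestSeatRight seats (l + 1); omega

lemma bestSeatRight_le (seats : List Int) (r : Nat) (hr : r ≤ seats.length) :
    bestSeatRight seats r ≤ seats.length := by
  fun_induction bestSeatRight with
  | case1 r h ih => exact ih (by omega)
  | case2 r h => omega

lemma bestSeatRight_zero (seats : List Int) (r : Nat) :
    ∀ i : Nat, r ≤ i → i < bestSeatRight seats r →
      PySem.List.pyGet? seats (i : Int) = some 0 := by
  fun_induction bestSeatRight with
  | case1 r h ih =>
    intro i h1 h2
    rcases Nat.eq_or_lt_of_le h1 with rfl | h1'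
    · exact h.2
    · exact ih i h1' h2
  | case2 r h => intro i h1 h2; omega

lemma bestSeatRight_stop (seats : List Int) (r : Nat) :
    ¬ (bestSeatRight seats r < seats.length ∧
       PySem.List.pyGet? seats ((bestSeatRight seats r : Nat) : Int) = some 0) := by
  fun_induction bestSeatRight with
  | case1 r h ih => exact ih
  | case2 r h => exact h

-- A's loop = fold of pvStep over consecutive pvBounds pairs
lemma loop_eq_fold (seats : List Int) (l : Nat) (best maxSpace : Int) :
    bestSeatLoop seats l best maxSpace =
      (List.foldl pvStep (best, maxSpace)
        (List.zip ((l : Int) :: (pvBounds seats l).map (Nat.cast))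
                  ((pvBounds seats l).map (Nat.cast)))).1 := by
  fun_induction bestSeatLoop with
  | case1 l best maxSpace h right availableSpace hgt ih =>
    rw [pvBounds, dif_pos h]
    simp only [List.map_cons, List.zip_cons_cons, List.foldl_cons]
    rw [ih]
    congr 1
    have hgt' : ((bestSeatRight seats (l + 1) : Nat) : Int) - (l : Int) - 1 > maxSpace := hgt
    simp [pvStep, right, hgt']
    rfl
  | case2 l best maxSpace h right availableSpace hgt ih =>
    rw [pvBounds, dif_pos h]
    simp only [List.map_cons, List.zip_cons_cons, List.foldl_cons]
    rw [ih]
    congr 1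
    have hgt' : ¬ (((bestSeatRight seats (l + 1) : Nat) : Int) - (l : Int) - 1 > maxSpace) := hgt
    simp [pvStep, right, hgt']
  | case3 l best maxSpace h =>
    rw [pvBounds, dif_neg h]
    simp

-- the filtered range with lower bound l
def pvFilt (seats : List Int) (l : Nat) : List Int :=
  (PySem.List.pyRange 1 (seats.length : Int) 1).filter
    (fun i => decide ((l : Int) < i) && decide (PySem.List.pyGet? seats i ≠ some 0))

-- B's bounds tail equals pvBounds
lemma filt_eq_bounds (seats : List Int) (l : Nat) :
    l < seats.length → pvFilt seats l ++ [(seats.length : Int)] = (pvBounds seats l).map (Nat.cast) := by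
  fun_induction pvBounds with
  | case1 l h ih =>
    intro hl
    have hr1 : l + 1 ≤ bestSeatRight seats (l + 1) := le_bestSeatRight seats (l + 1)
    have hr2 : bestSeatRight seats (l + 1) ≤ seats.length :=
      bestSeatRight_le seats (l + 1) (by omega)
    set r := bestSeatRight seats (l + 1) with hrdef
    have h0 : ∀ m : Nat, m ≤ r → (PySem.List.pyRange 1 (m : Int) 1).filter
        (fun i => decide ((l : Int) < i) && decide (PySem.List.pyGet? seats i ≠ some 0)) = [] := by
      intro m hm
      rw [List.filter_eq_nil_iff]
      intro i hi
      rw [PySem.List.mem_pyRange_one] at hi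
      simp only [Bool.and_eq_true, decide_eq_true_eq, not_and_or]
      by_cases hli : (l : Int) < i
      · right
        have hiN : i = ((i.toNat : Nat) : Int) := by omega
        have := bestSeatRight_zero seats (l + 1) i.toNat (by omega) (by omega)
        simp only [not_not]
        rw [hiN]; exact this
      · left; simp [hli]
    rcases Nat.eq_or_lt_of_le hr2 with hrl | hrl
    · -- r = len: nothing nonzero after l, pvBounds r = []
      rw [List.map_cons, pvBounds, dif_neg (by omega : ¬ r < seats.length)]
      rw [pvFilt, h0 seats.length (by omega)]
      simp [hrl]
    · -- r < len: peel ↑r off the filter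
      rw [List.map_cons, ← ih hrl]
      have hsplit : PySem.List.pyRange 1 (seats.length : Int) 1 =
          PySem.List.pyRange 1 (r : Int) 1 ++ PySem.List.pyRange (r : Int) (seats.length : Int) 1 :=
        PySem.List.pyRange_one_append 1 (r : Int) (seats.length : Int)
          (by exact_mod_cast Nat.one_le_iff_ne_zero.mpr (by omega)) (by exact_mod_cast hrl.le)
      have hcons : PySem.List.pyRange (r : Int) (seats.length : Int) 1 =
          (r : Int) :: PySem.List.pyRange ((r : Int) + 1) (seats.length : Int) 1 :=
        PySem.List.pyRange_one_cons (by exact_mod_cast hrl)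
      have hPr : PySem.List.pyGet? seats ((r : Nat) : Int) ≠ some 0 := by
        intro hc; exact bestSeatRight_stop seats (l + 1) ⟨hrl, hc⟩
      have hlowR : (PySem.List.pyRange 1 (r : Int) 1).filter
          (fun i => decide ((r : Int) < i) && decide (PySem.List.pyGet? seats i ≠ some 0)) = [] := by
        rw [List.filter_eq_nil_iff]
        intro i hi
        rw [PySem.List.mem_pyRange_one] at hi
        simp only [Bool.and_eq_true, decide_eq_true_eq, not_and_or]
        left; simp; omega
      have hcongr : ∀ i ∈ PySem.List.pyRange ((r : Int) + 1) (seats.length : Int) 1,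
          (decide ((l : Int) < i) && decide (PySem.List.pyGet? seats i ≠ some 0)) =
          (decide ((r : Int) < i) && decide (PySem.List.pyGet? seats i ≠ some 0)) := by
        intro i hi
        rw [PySem.List.mem_pyRange_one] at hi
        have h1 : (l : Int) < i := by omega
        have h2 : (r : Int) < i := by omega
        simp [h1, h2]
      rw [pvFilt, pvFilt, hsplit, hcons]
      rw [List.filter_append, List.filter_append, h0 r le_rfl, hlowR]
      simp only [List.nil_append, List.filter_cons]
      have c1 : (decide ((l : Int) < (r : Int)) && decide (PySem.List.pyGet? seats ((r : Nat) : Int) ≠ some 0)) = true := by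
        simp only [Bool.and_eq_true, decide_eq_true_eq]
        exact ⟨by exact_mod_cast Nat.lt_of_lt_of_le (Nat.lt_succ_self l) hr1, hPr⟩
      have c2 : (decide ((r : Int) < (r : Int)) && decide (PySem.List.pyGet? seats ((r : Nat) : Int) ≠ some 0)) = false := by
        simp
      rw [c1, c2, List.filter_congr hcongr]
      simp
  | case2 l h =>
    intro hl; omega

-- B's port bounds = 0 :: (pvFilt 0 ++ [len]) : the 0 < i condition is free on pyRange 1 n
lemma alt_bounds_eq (seats : List Int) :
    (PySem.List.pyRange 1 (seats.length : Int) 1).filter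
        (fun i => PySem.List.pyGet? seats i ≠ some 0) = pvFilt seats 0 := by
  rw [pvFilt]
  apply List.filter_congr
  intro i hi
  rw [PySem.List.mem_pyRange_one] at hi
  have h0 : ((0 : Nat) : Int) < i := by omega
  simp only [h0, decide_true, Bool.true_and]

-- ===== VERDICT (by name: the statement is the Claim_ definition above) =====
theorem bestSeat_spec : Claim_equal_bestSeat := by
  intro seats _
  show bestSeat seats = bestSeat_alt seats
  rw [bestSeat, loop_eq_fold]
  simp only [bestSeat_alt]
  rcases seats with _ | ⟨a, rest⟩
  · rw [pvBounds, dif_neg (by simp : ¬ (0:Nat) < ([] : List Int).length)]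
    simp [PySem.List.pyRange_one_eq_nil]
  · rw [alt_bounds_eq, filt_eq_bounds (a :: rest) 0 (by simp)]
    simp only [List.tail_cons, Nat.cast_zero]
    rfl
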